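-- pv_equiv track=rewrite | github.com/phoenixway/local_bookmarks | runtime_edit_guards.py | _has_import_after_declaration
-- ===== SOURCE A (Python) =====
-- def _normalize_line(line: str) -> str:
--     return line.strip()
--
-- def _has_import_after_declaration(body_lines: list[str]) -> bool:
--     seen_declaration = False
--     for line in body_lines:
--         normalized = _normalize_line(line)
--         if not normalized:
--             continue
--         if normalized.startswith("import "):
--             if seen_declaration:
--                 return True
--             continue
--         seen_declaration = True
--     return False
-- ===== SOURCE B (Python) =====
-- def _has_import_after_declaration(body_lines: list[str]) -> bool:
--     idx = next((i for i, ln in enumerate(body_lines)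
--                 if ln.strip() and not ln.strip().startswith("import ")), None)
--     if idx is None:
--         return False
--     return any(ln.strip().startswith("import ") for ln in body_lines[idx + 1:])
-- ===== Notes on version B (the rewrite author's own statement) =====
-- stated objective: simpler
-- what changed: Replaced A's single stateful scan (seen_declaration flag) by a two-phase decomposition: locate the first declaration line with next() over enumerate, then check the tail with any().
import Mathlib
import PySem

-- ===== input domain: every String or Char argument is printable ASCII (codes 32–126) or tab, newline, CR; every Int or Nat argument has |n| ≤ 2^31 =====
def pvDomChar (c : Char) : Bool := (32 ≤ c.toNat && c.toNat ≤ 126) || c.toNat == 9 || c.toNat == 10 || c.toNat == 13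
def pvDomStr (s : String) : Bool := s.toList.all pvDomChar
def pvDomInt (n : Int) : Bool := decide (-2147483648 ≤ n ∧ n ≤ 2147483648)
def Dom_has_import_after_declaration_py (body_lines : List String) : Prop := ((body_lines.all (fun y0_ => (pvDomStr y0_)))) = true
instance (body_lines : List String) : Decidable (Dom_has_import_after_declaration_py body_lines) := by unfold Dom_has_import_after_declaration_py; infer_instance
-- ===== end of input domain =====

-- B replaces A's single stateful scan by locate-first-declaration then scan-the-tail (simpler decomposition; same O(n) cost).


-- ===== PORT A =====
def pvLoopA (seen : Bool) : List String → Bool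
  | [] => false
  | line :: rest =>
    let normalized := PySem.Str.strip line
    if normalized = "" then pvLoopA seen rest
    else if PySem.Str.startswith normalized "import " then
      (if seen then true else pvLoopA seen rest)
    else pvLoopA true rest

def has_import_after_declaration_py (body_lines : List String) : Bool :=
  pvLoopA false body_lines

-- ===== PORT B =====
def pvIsImport (ln : String) : Bool := PySem.Str.startswith (PySem.Str.strip ln) "import "

def pvIsDecl (ln : String) : Bool := (PySem.Str.strip ln != "") && !pvIsImport ln

def has_import_after_declaration_py_alt (body_lines : List String) : Bool :=
  match body_lines.findIdx? pvIsDecl with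
  | none => false
  | some idx => (body_lines.drop (idx + 1)).any pvIsImport

-- ===== PRECONDITION & SPEC =====
def Spec_has_import_after_declaration_py (body_lines : List String) (out : Bool) : Prop := out = has_import_after_declaration_py_alt body_lines
instance (body_lines : List String) (out : Bool) : Decidable (Spec_has_import_after_declaration_py body_lines out) := by unfold Spec_has_import_after_declaration_py; infer_instance

-- ===== CLAIM (what is proved, stated in full; the proofs are below) =====
def Claim_equal_has_import_after_declaration_py : Prop := ∀ (body_lines : List String), Dom_has_import_after_declaration_py body_lines → Spec_has_import_after_declaration_py body_lines (has_import_after_declaration_py body_lines)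

-- ===== LEMMAS AND PROOFS =====

-- ===== VERDICT (by name: the statement is the Claim_ definition above) =====
lemma pvIsImport_eq (l : String) :
    pvIsImport l = PySem.Str.startswith (PySem.Str.strip l) "import " := rfl

lemma pvIsImport_of_blank (l : String) (h : PySem.Str.strip l = "") :
    pvIsImport l = false := by
  rw [pvIsImport_eq, h]; decide

lemma pvLoopA_cons_false (l : String) (ls : List String) :
    pvLoopA false (l :: ls) =
      if PySem.Str.strip l = "" then pvLoopA false ls
      else if pvIsImport l = true then pvLoopA false ls
      else pvLoopA true ls := rfl

lemma pvLoopA_cons_true (l : String) (ls : List String) :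
    pvLoopA true (l :: ls) =
      if PySem.Str.strip l = "" then pvLoopA true ls
      else if pvIsImport l = true then true
      else pvLoopA true ls := rfl

lemma pvDecl_cases (l : String) (hd : ¬ pvIsDecl l = true) :
    PySem.Str.strip l = "" ∨ pvIsImport l = true := by
  by_cases h : PySem.Str.strip l = ""
  · exact Or.inl h
  · right
    by_contra h2
    apply hd
    simp only [Bool.not_eq_true] at h2
    simp only [pvIsDecl, Bool.and_eq_true, bne_iff_ne, Bool.not_eq_true']
    exact ⟨h, h2⟩

lemma pvLoopA_true_eq (ls : List String) : pvLoopA true ls = ls.any pvIsImport := by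
  induction ls with
  | nil => rfl
  | cons l ls ih =>
    rw [pvLoopA_cons_true, List.any_cons]
    by_cases h : PySem.Str.strip l = ""
    · rw [if_pos h, pvIsImport_of_blank l h, Bool.false_or, ih]
    · rw [if_neg h]
      by_cases h2 : pvIsImport l = true
      · rw [if_pos h2, h2, Bool.true_or]
      · rw [if_neg h2, Bool.not_eq_true] at *
        rw [h2, Bool.false_or, ih]

lemma pvLoopA_false_eq (ls : List String) :
    pvLoopA false ls = has_import_after_declaration_py_alt ls := by
  induction ls with
  | nil => rfl
  | cons l ls ih =>
    rw [pvLoopA_cons_false]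
    simp only [has_import_after_declaration_py_alt, List.findIdx?_cons]
    by_cases hd : pvIsDecl l = true
    · have hd2 := hd
      simp only [pvIsDecl, Bool.and_eq_true, bne_iff_ne, Bool.not_eq_true'] at hd2
      obtain ⟨h1, h2⟩ := hd2
      have h2' : pvIsImport l = false := h2
      rw [if_neg h1, h2', if_neg (by decide), hd]
      simp only [List.drop_succ_cons]
      exact pvLoopA_true_eq ls
    · have hLHS : (if PySem.Str.strip l = "" then pvLoopA false ls
          else if pvIsImport l = true then pvLoopA false ls
          else pvLoopA true ls) = pvLoopA false ls := by
        rcases pvDecl_cases l hd with h | h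
        · rw [if_pos h]
        · have hne : ¬ PySem.Str.strip l = "" := by
            intro hb
            rw [pvIsImport_of_blank l hb] at h
            exact Bool.false_ne_true h
          rw [if_neg hne, if_pos h]
      rw [hLHS, ih]
      simp only [has_import_after_declaration_py_alt]
      rw [if_neg hd]
      cases hfi : ls.findIdx? pvIsDecl with
      | none => simp
      | some i => simp [List.drop_succ_cons]

theorem has_import_after_declaration_py_spec : Claim_equal_has_import_after_declaration_py := by
  intro bl _
  unfold Spec_has_import_after_declaration_py has_import_after_declaration_py
  exact pvLoopA_false_eq bl
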